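-- pv_equiv track=rewrite | github.com/collinsakenga/codewars_solutions | 6 kyu/Coding 3min Virus in Apple.py | infect_apple
-- ===== SOURCE A (Python) =====
-- from copy import deepcopy
--
-- def infect_apple(apple, n):
--     res=deepcopy(apple)
--     for _ in range(n):
--         temp=deepcopy(res)
--         for i in range(len(res)):
--             for j in range(len(res[i])):
--                 if temp[i][j]!="V":
--                     continue
--                 if i>0:
--                     res[i-1][j]="V"
--                 if j<(len(res[i])-1):
--                     res[i][j+1]="V"
--                 if i<(len(res)-1):
--                     res[i+1][j]="V"
--                 if j>0:
--                     res[i][j-1]="V"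
--     return res
-- ===== SOURCE B (Python) =====
-- def infect_apple(apple, n):
--     vs = [(i, j) for i, row in enumerate(apple) for j, c in enumerate(row) if c == "V"]
--     return [["V" if any(abs(i - a) + abs(j - b) <= n for a, b in vs) else c
--              for j, c in enumerate(row)]
--             for i, row in enumerate(apple)]
-- ===== Notes on version B (the rewrite author's own statement) =====
-- stated objective: alternative
-- what changed: Replaces A's n rounds of full-grid copy-and-scan simulation by a closed form: collect the initial V coordinates once and mark each cell V iff its Manhattan distance to some initial V cell is at most n (exact on the rectangular grids Pre_ admits); B's cost is independent of n.
-- outside the precondition, e.g. on infect_apple([['V'], ['x', 'x']], 1): A returns [['V'], ['V', 'x']], B returns [['V'], ['V', 'x']]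
import Mathlib
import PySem

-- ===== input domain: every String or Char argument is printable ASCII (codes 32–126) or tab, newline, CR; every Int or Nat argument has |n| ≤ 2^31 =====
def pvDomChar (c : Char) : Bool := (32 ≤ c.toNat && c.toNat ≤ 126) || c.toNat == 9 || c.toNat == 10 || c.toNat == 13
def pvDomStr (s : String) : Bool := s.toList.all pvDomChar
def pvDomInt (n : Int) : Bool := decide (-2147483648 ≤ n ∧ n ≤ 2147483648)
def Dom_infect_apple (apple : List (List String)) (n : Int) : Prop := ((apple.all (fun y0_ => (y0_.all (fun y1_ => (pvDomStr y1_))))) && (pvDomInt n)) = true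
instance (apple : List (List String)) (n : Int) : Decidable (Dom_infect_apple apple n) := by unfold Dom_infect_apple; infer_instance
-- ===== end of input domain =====

-- B replaces A's n full-grid simulation rounds by a closed-form per-cell Manhattan-distance
-- test against the initial set of "V" cells (exact on the rectangular grids Pre_ admits).

-- ===== PORT A =====
-- cell read apple[i][j] (defaults only used in-range by the ports)
def pvVal (g : List (List String)) (i j : Nat) : String := (g.getD i []).getD j ""
-- mutation res[i][j] = "V"
def pvWr (g : List (List String)) (i j : Nat) : List (List String) :=
  g.modify i (fun row => row.set j "V")
-- loop body for one (i, j): the four guarded writes, in A's order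
def pvBody (temp res : List (List String)) (i j : Nat) : List (List String) :=
  if pvVal temp i j = "V" then
    let r1 := if 0 < i then pvWr res (i - 1) j else res
    let r2 := if j + 1 < (r1.getD i []).length then pvWr r1 i (j + 1) else r1
    let r3 := if i + 1 < r2.length then pvWr r2 (i + 1) j else r2
    if 0 < j then pvWr r3 i (j - 1) else r3
  else res
-- one round: temp = snapshot res0, nested loops over indices
def pvStep (res0 : List (List String)) : List (List String) :=
  (List.range res0.length).foldl
    (fun res i =>
      (List.range ((res.getD i []).length)).foldl (fun res j => pvBody res0 res i j) res)
    res0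

def infect_apple (apple : List (List String)) (n : Int) : List (List String) :=
  (List.range n.toNat).foldl (fun res _ => pvStep res) apple

-- ===== PORT B =====
-- [(i, j) for i, row in enumerate(apple) for j, c in enumerate(row) if c == "V"]
def pvVCoords (apple : List (List String)) : List (Nat × Nat) :=
  apple.zipIdx.flatMap (fun ri =>
    ri.1.zipIdx.filterMap (fun cj => if cj.1 = "V" then some (ri.2, cj.2) else none))
-- any(abs(i - a) + abs(j - b) <= n for a, b in vs)
def pvInfected (vs : List (Nat × Nat)) (n : Int) (i j : Nat) : Bool :=
  vs.any (fun ab => ((((i : Int) - ab.1).natAbs + ((j : Int) - ab.2).natAbs : Nat) : Int) ≤ n)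

def infect_apple_alt (apple : List (List String)) (n : Int) : List (List String) :=
  let vs := pvVCoords apple
  apple.mapIdx (fun i row => row.mapIdx (fun j c => if pvInfected vs n i j then "V" else c))

-- ===== PRECONDITION & SPEC =====
-- Pre_ excludes ragged (non-rectangular) grids that contain a "V" with n ≥ 1: there A
-- usually raises IndexError when the virus spreads vertically into a shorter row, and on the
-- few such grids where it returns, B's Manhattan-distance rule is only exact for rectangles.
def Pre_infect_apple (apple : List (List String)) (n : Int) : Prop :=
  (∀ row ∈ apple, row.length = (apple.headD []).length) ∨
  (∀ row ∈ apple, "V" ∉ row) ∨ n ≤ 0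

instance (apple : List (List String)) (n : Int) : Decidable (Pre_infect_apple apple n) := by
  unfold Pre_infect_apple; infer_instance

def pvWitness_infect_apple : List (List String) × Int := ([["V", "x"], ["x", "x"]], 2)

def Spec_infect_apple (apple : List (List String)) (n : Int) (out : List (List String)) : Prop := out = infect_apple_alt apple n
instance (apple : List (List String)) (n : Int) (out : List (List String)) : Decidable (Spec_infect_apple apple n out) := by unfold Spec_infect_apple; infer_instance

-- ===== CLAIM (what is proved, stated in full; the proofs are below) =====
def Claim_equal_infect_apple : Prop := ∀ (apple : List (List String)) (n : Int), Dom_infect_apple apple n → Pre_infect_apple apple n → Spec_infect_apple apple n (infect_apple apple n)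

-- ===== LEMMAS AND PROOFS =====

-- rectangularity: every row has length C
def pvRect (C : Nat) (g : List (List String)) : Prop := ∀ row ∈ g, row.length = C

-- shape agreement (lengths only)
def pvShape (t g : List (List String)) : Prop :=
  g.length = t.length ∧ ∀ i, (g.getD i []).length = (t.getD i []).length

-- apply a list of writes from left to right
def pvApply (ws : List (Nat × Nat)) (g : List (List String)) : List (List String) :=
  ws.foldl (fun h w => pvWr h w.1 w.2) g

-- the writes A performs in one round, as a flat list
def pvTargets (temp : List (List String)) (R C i j : Nat) : List (Nat × Nat) :=
  if pvVal temp i j = "V" then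
    (if 0 < i then [(i - 1, j)] else []) ++ (if j + 1 < C then [(i, j + 1)] else []) ++
    (if i + 1 < R then [(i + 1, j)] else []) ++ (if 0 < j then [(i, j - 1)] else [])
  else []
def pvWrites (temp : List (List String)) (R C : Nat) : List (Nat × Nat) :=
  (List.range R).flatMap (fun i => (List.range C).flatMap (fun j => pvTargets temp R C i j))

lemma pvShape_refl (t : List (List String)) : pvShape t t := ⟨rfl, fun _ => rfl⟩

lemma length_pvWr (g : List (List String)) (a b : Nat) : (pvWr g a b).length = g.length := by
  simp [pvWr]

lemma rowlen_pvWr (g : List (List String)) (a b i : Nat) :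
    ((pvWr g a b).getD i []).length = (g.getD i []).length := by
  unfold pvWr
  rw [List.getD_eq_getElem?_getD, List.getD_eq_getElem?_getD, List.getElem?_modify]
  cases g[i]? <;> simp <;> split <;> simp

lemma pvShape_pvWr (t g : List (List String)) (a b : Nat) (h : pvShape t g) :
    pvShape t (pvWr g a b) := by
  exact ⟨by rw [length_pvWr]; exact h.1, fun i => by rw [rowlen_pvWr]; exact h.2 i⟩

lemma pvVal_pvWr (g : List (List String)) (a b i j : Nat)
    (ha : a < g.length) (hb : b < (g.getD a []).length) :
    pvVal (pvWr g a b) i j = if a = i ∧ b = j then "V" else pvVal g i j := by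
  unfold pvVal pvWr
  rw [List.getD_eq_getElem?_getD, List.getD_eq_getElem?_getD, List.getElem?_modify]
  rw [List.getD_eq_getElem?_getD, List.getElem?_eq_getElem ha] at hb
  simp only [Option.getD_some] at hb
  by_cases hai : a = i
  · subst hai
    rw [List.getElem?_eq_getElem ha]
    simp only [Option.map_some, if_pos rfl, Option.getD_some, List.getElem?_set]
    by_cases hbj : b = j
    · subst hbj; simp [hb]
    · simp [hbj, List.getD_eq_getElem?_getD, List.getElem?_eq_getElem ha]
  · have hmap : ((fun r => if a = i then r.set b "V" else r) <$> g[i]?) = g[i]? := by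
      cases g[i]? <;> simp [hai]
    rw [hmap]
    simp [hai, List.getD_eq_getElem?_getD]

lemma pvShape_pvApply (ws : List (Nat × Nat)) (t g : List (List String)) (h : pvShape t g) :
    pvShape t (pvApply ws g) := by
  induction ws generalizing g with
  | nil => exact h
  | cons w ws ih => exact ih _ (pvShape_pvWr t g w.1 w.2 h)

lemma pvVal_pvApply (ws : List (Nat × Nat)) (g : List (List String)) (i j : Nat)
    (hws : ∀ w ∈ ws, w.1 < g.length ∧ w.2 < (g.getD w.1 []).length) :
    pvVal (pvApply ws g) i j = if (i, j) ∈ ws then "V" else pvVal g i j := by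
  induction ws generalizing g with
  | nil => simp [pvApply]
  | cons w ws ih =>
    have hw := hws w (List.mem_cons_self ..)
    have hrest : ∀ w' ∈ ws, w'.1 < (pvWr g w.1 w.2).length ∧
        w'.2 < ((pvWr g w.1 w.2).getD w'.1 []).length := by
      intro w' hw'
      rw [length_pvWr, rowlen_pvWr]
      exact hws w' (List.mem_cons_of_mem _ hw')
    have : pvApply (w :: ws) g = pvApply ws (pvWr g w.1 w.2) := rfl
    rw [this, ih _ hrest, pvVal_pvWr g w.1 w.2 i j hw.1 hw.2]
    by_cases hm : (i, j) ∈ ws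
    · simp [hm]
    · by_cases he : w = (i, j)
      · subst he; simp [hm]
      · have hc : ¬ (w.1 = i ∧ w.2 = j) := by
          intro ⟨h1, h2⟩; exact he (by rw [← h1, ← h2])
        have hne : (i, j) ≠ w := fun h => he h.symm
        simp [hm, hc, hne]

-- row read in-range
lemma getD_eq_getElem_row (g : List (List String)) (i : Nat) (h : i < g.length) :
    g.getD i [] = g[i] := by
  rw [List.getD_eq_getElem?_getD, List.getElem?_eq_getElem h]; rfl

lemma pvRect_rowlen (C : Nat) (g : List (List String)) (hr : pvRect C g) (i : Nat)
    (h : i < g.length) : (g.getD i []).length = C := by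
  rw [getD_eq_getElem_row g i h]
  exact hr _ (List.getElem_mem h)

-- every write of one round is in shape
lemma pvWrites_inrange (temp : List (List String)) (R C : Nat) (hr : pvRect C temp)
    (hl : temp.length = R) :
    ∀ w ∈ pvWrites temp R C, w.1 < R ∧ w.2 < C := by
  intro w hw
  simp only [pvWrites, List.mem_flatMap, List.mem_range] at hw
  obtain ⟨i, hi, j, hj, hw⟩ := hw
  unfold pvTargets at hw
  split at hw
  · simp only [List.mem_append] at hw
    rcases hw with ((h | h) | h) | h <;> split at h <;> simp_all <;> omega
  · simp at hw

-- adjacency (4-neighbourhood) on Nat indices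
def pvAdj (p q i j : Nat) : Prop :=
  (i = p + 1 ∧ j = q) ∨ (p = i + 1 ∧ j = q) ∨ (i = p ∧ j = q + 1) ∨ (i = p ∧ q = j + 1)

lemma mem_pvWrites (temp : List (List String)) (R C p q : Nat) :
    (p, q) ∈ pvWrites temp R C ↔
      ∃ i, i < R ∧ ∃ j, j < C ∧ pvVal temp i j = "V" ∧ pvAdj p q i j ∧ p < R ∧ q < C := by
  simp only [pvWrites, List.mem_flatMap, List.mem_range]
  constructor
  · rintro ⟨i, hi, j, hj, hw⟩
    unfold pvTargets at hw
    split at hw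
    case isTrue hv =>
      refine ⟨i, hi, j, hj, hv, ?_⟩
      simp only [List.mem_append] at hw
      unfold pvAdj
      rcases hw with ((h | h) | h) | h <;> split at h <;> simp_all <;> omega
    case isFalse => simp at hw
  · rintro ⟨i, hi, j, hj, hv, hadj, hp, hq⟩
    refine ⟨i, hi, j, hj, ?_⟩
    unfold pvTargets
    rw [if_pos hv]
    simp only [List.mem_append]
    unfold pvAdj at hadj
    rcases hadj with ⟨h1, h2⟩ | ⟨h1, h2⟩ | ⟨h1, h2⟩ | ⟨h1, h2⟩
    · refine .inl (.inl (.inl ?_))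
      rw [if_pos (show 0 < i by omega)]
      simp; omega
    · refine .inl (.inr ?_)
      rw [if_pos (show i + 1 < R by omega)]
      simp; omega
    · refine .inr ?_
      rw [if_pos (show 0 < j by omega)]
      simp; omega
    · refine .inl (.inl (.inr ?_))
      rw [if_pos (show j + 1 < C by omega)]
      simp; omega

lemma pvApply_append (xs ys : List (Nat × Nat)) (g : List (List String)) :
    pvApply (xs ++ ys) g = pvApply ys (pvApply xs g) := by
  simp [pvApply, List.foldl_append]

-- one round = the flat write list
lemma pvBody_eq (temp res : List (List String)) (R C i j : Nat)
    (hr : pvRect C temp) (hl : temp.length = R) (hi : i < R) (hs : pvShape temp res) :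
    pvBody temp res i j = pvApply (pvTargets temp R C i j) res := by
  have happ : ∀ (c : Prop) [Decidable c] (w : Nat × Nat) (rest : List (Nat × Nat))
      (g : List (List String)),
      pvApply ((if c then [w] else []) ++ rest) g
        = pvApply rest (if c then pvWr g w.1 w.2 else g) := by
    intro c _ w rest g
    split <;> simp [pvApply_append, pvApply]
  unfold pvBody pvTargets
  split
  case isFalse => rfl
  case isTrue hv =>
    have hlen : res.length = R := hs.1.trans hl
    have hrow : ∀ k, k < R → (res.getD k []).length = C := by
      intro k hk
      rw [hs.2 k]
      exact pvRect_rowlen C temp hr k (by omega)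
    simp only [List.append_assoc]
    rw [happ, happ, happ]
    have hs1 : pvShape temp (if 0 < i then pvWr res (i - 1) j else res) := by
      split
      · exact pvShape_pvWr _ _ _ _ hs
      · exact hs
    have hs2 : pvShape temp (if j + 1 < C then pvWr (if 0 < i then pvWr res (i - 1) j else res) i (j + 1) else (if 0 < i then pvWr res (i - 1) j else res)) := by
      split
      · exact pvShape_pvWr _ _ _ _ hs1
      · exact hs1
    have e1 : ((if 0 < i then pvWr res (i - 1) j else res).getD i []).length = C := by
      rw [hs1.2 i, ← hs.2 i]
      exact hrow i hi
    have e2 : (if j + 1 < C then pvWr (if 0 < i then pvWr res (i - 1) j else res) i (j + 1) else (if 0 < i then pvWr res (i - 1) j else res)).length = R := by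
      rw [hs2.1, hl]
    rw [e1, e2]
    split <;> simp [pvApply]

lemma pvStep_eq (g : List (List String)) (R C : Nat) (hr : pvRect C g) (hl : g.length = R) :
    pvStep g = pvApply (pvWrites g R C) g := by
  have hfold : ∀ (L : List Nat) (w : Nat → List (Nat × Nat))
      (f : List (List String) → Nat → List (List String)),
      (∀ res x, x ∈ L → pvShape g res → f res x = pvApply (w x) res) →
      ∀ res, pvShape g res → L.foldl f res = pvApply (L.flatMap w) res := by
    intro L
    induction L with
    | nil => intro w f _ res _; rfl
    | cons x L ih =>
      intro w f hf res hres
      have h1 : f res x = pvApply (w x) res := hf res x (List.mem_cons_self ..) hres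
      have h2 : L.foldl f (f res x) = pvApply (L.flatMap w) (f res x) := by
        refine ih w f (fun r y hy hr => hf r y (List.mem_cons_of_mem _ hy) hr) _ ?_
        rw [h1]; exact pvShape_pvApply _ _ _ hres
      simp only [List.foldl_cons, List.flatMap_cons]
      rw [h2, h1, pvApply_append]
  have hinner : ∀ res i, i ∈ List.range R → pvShape g res →
      (List.range ((res.getD i []).length)).foldl (fun res j => pvBody g res i j) res
        = pvApply ((List.range C).flatMap (fun j => pvTargets g R C i j)) res := by
    intro res i hi hres
    have hiR : i < R := List.mem_range.mp hi
    have : (res.getD i []).length = C := by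
      rw [hres.2 i]
      exact pvRect_rowlen C g hr i (by omega)
    rw [this]
    exact hfold (List.range C) _ _ (fun r j _ hr' => pvBody_eq g r R C i j hr hl hiR hr') res hres
  unfold pvStep
  rw [hl]
  exact hfold (List.range R) _ _ hinner g (pvShape_refl g)

lemma pvRect_pvStep (g : List (List String)) (C : Nat) (hr : pvRect C g) :
    pvRect C (pvStep g) ∧ (pvStep g).length = g.length := by
  rw [pvStep_eq g g.length C hr rfl]
  have hs : pvShape g (pvApply (pvWrites g g.length C) g) :=
    pvShape_pvApply _ _ _ (pvShape_refl g)
  refine ⟨?_, hs.1⟩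
  intro row hrow
  obtain ⟨i, hi, rfl⟩ := List.mem_iff_getElem.mp hrow
  rw [← getD_eq_getElem_row _ _ hi, hs.2 i]
  exact pvRect_rowlen C g hr i (hs.1 ▸ hi)

-- Manhattan distance on indices
def pvDist (p a q b : Nat) : Nat := ((p : Int) - a).natAbs + ((q : Int) - b).natAbs

-- infected within k rounds: some initial V cell within distance k
def pvInfB (apple : List (List String)) (C k p q : Nat) : Prop :=
  ∃ a, a < apple.length ∧ ∃ b, b < C ∧ pvVal apple a b = "V" ∧ pvDist p a q b ≤ k

-- k rounds of A
def pvIter (k : Nat) (g : List (List String)) : List (List String) :=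
  (List.range k).foldl (fun r _ => pvStep r) g

lemma pvIter_succ (k : Nat) (g : List (List String)) :
    pvIter (k + 1) g = pvStep (pvIter k g) := by
  simp [pvIter, List.range_succ]

lemma pvIter_shape (apple : List (List String)) (C k : Nat) (hr : pvRect C apple) :
    pvRect C (pvIter k apple) ∧ (pvIter k apple).length = apple.length := by
  induction k with
  | zero => exact ⟨hr, rfl⟩
  | succ k ih =>
    rw [pvIter_succ]
    obtain ⟨h1, h2⟩ := pvRect_pvStep (pvIter k apple) C ih.1
    exact ⟨h1, h2.trans ih.2⟩

-- the Manhattan ball grows by exactly one layer per round (needs the rectangle)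
lemma pvInfB_succ (apple : List (List String)) (C k p q : Nat)
    (hp : p < apple.length) (hq : q < C) :
    pvInfB apple C (k + 1) p q ↔
      pvInfB apple C k p q ∨
        ∃ i, i < apple.length ∧ ∃ j, j < C ∧ pvAdj p q i j ∧ pvInfB apple C k i j := by
  constructor
  · rintro ⟨a, ha, b, hb, hv, hd⟩
    unfold pvDist at hd
    by_cases hk : ((p : Int) - a).natAbs + ((q : Int) - b).natAbs ≤ k
    · exact Or.inl ⟨a, ha, b, hb, hv, hk⟩
    · refine Or.inr ?_
      rcases Nat.lt_trichotomy p a with hpa | hpa | hpa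
      · exact ⟨p + 1, by omega, q, hq, Or.inl ⟨rfl, rfl⟩,
          a, ha, b, hb, hv, by unfold pvDist; omega⟩
      · rcases Nat.lt_trichotomy q b with hqb | hqb | hqb
        · exact ⟨p, hp, q + 1, by omega, Or.inr (Or.inr (Or.inl ⟨rfl, rfl⟩)),
            a, ha, b, hb, hv, by unfold pvDist; omega⟩
        · exact absurd hd (by omega)
        · exact ⟨p, hp, q - 1, by omega, Or.inr (Or.inr (Or.inr ⟨rfl, by omega⟩)),
            a, ha, b, hb, hv, by unfold pvDist; omega⟩
      · exact ⟨p - 1, by omega, q, hq, Or.inr (Or.inl ⟨by omega, rfl⟩),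
          a, ha, b, hb, hv, by unfold pvDist; omega⟩
  · rintro (⟨a, ha, b, hb, hv, hd⟩ | ⟨i, hi, j, hj, hadj, a, ha, b, hb, hv, hd⟩)
    · exact ⟨a, ha, b, hb, hv, by unfold pvDist at hd ⊢; omega⟩
    · refine ⟨a, ha, b, hb, hv, ?_⟩
      unfold pvDist at hd ⊢
      unfold pvAdj at hadj
      rcases hadj with ⟨h1, h2⟩ | ⟨h1, h2⟩ | ⟨h1, h2⟩ | ⟨h1, h2⟩ <;> omega

-- main invariant: after k rounds a cell is "V" iff it is in the distance-k ball
lemma pvIter_val (apple : List (List String)) (C : Nat) (hr : pvRect C apple) :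
    ∀ k p q, p < apple.length → q < C →
      (pvInfB apple C k p q → pvVal (pvIter k apple) p q = "V") ∧
      (¬ pvInfB apple C k p q → pvVal (pvIter k apple) p q = pvVal apple p q) := by
  intro k
  induction k with
  | zero =>
    intro p q hp hq
    constructor
    · rintro ⟨a, ha, b, hb, hv, hd⟩
      have hab : a = p ∧ b = q := by unfold pvDist at hd; omega
      obtain ⟨rfl, rfl⟩ := hab
      simpa [pvIter] using hv
    · intro _
      simp [pvIter]
  | succ k ih =>
    intro p q hp hq
    have hg := pvIter_shape apple C k hr
    have hstep : pvVal (pvIter (k + 1) apple) p q =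
        if (p, q) ∈ pvWrites (pvIter k apple) (pvIter k apple).length C then "V"
        else pvVal (pvIter k apple) p q := by
      rw [pvIter_succ, pvStep_eq (pvIter k apple) (pvIter k apple).length C hg.1 rfl]
      refine pvVal_pvApply _ _ p q ?_
      intro w hw
      have hwr := pvWrites_inrange (pvIter k apple) (pvIter k apple).length C hg.1 rfl w hw
      exact ⟨hwr.1, by rw [pvRect_rowlen C (pvIter k apple) hg.1 w.1 hwr.1]; exact hwr.2⟩
    constructor
    · intro hB
      rcases (pvInfB_succ apple C k p q hp hq).mp hB with hB' | ⟨i, hi, j, hj, hadj, hBij⟩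
      · rw [hstep]
        split
        · rfl
        · exact (ih p q hp hq).1 hB'
      · rw [hstep, if_pos ?_]
        apply (mem_pvWrites (pvIter k apple) (pvIter k apple).length C p q).mpr
        exact ⟨i, by omega, j, hj, (ih i j hi hj).1 hBij, hadj, by omega, hq⟩
    · intro hnB
      have hnk : ¬ pvInfB apple C k p q := fun h =>
        hnB ((pvInfB_succ apple C k p q hp hq).mpr (Or.inl h))
      have hnw : (p, q) ∉ pvWrites (pvIter k apple) (pvIter k apple).length C := by
        intro hw
        obtain ⟨i, hi, j, hj, hv, hadj, hpR, hqC⟩ :=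
          (mem_pvWrites (pvIter k apple) (pvIter k apple).length C p q).mp hw
        have hi' : i < apple.length := by omega
        have hBij : pvInfB apple C k i j := by
          by_cases hc : pvInfB apple C k i j
          · exact hc
          · refine ⟨i, hi', j, hj, ?_, by unfold pvDist; omega⟩
            rw [← (ih i j hi' hj).2 hc]
            exact hv
        exact hnB ((pvInfB_succ apple C k p q hp hq).mpr
          (Or.inr ⟨i, hi', j, hj, hadj, hBij⟩))
      rw [hstep, if_neg hnw]
      exact (ih p q hp hq).2 hnk

-- vs membership
lemma mem_pvVCoords (apple : List (List String)) (a b : Nat) :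
    (a, b) ∈ pvVCoords apple ↔
      a < apple.length ∧ b < (apple.getD a []).length ∧ pvVal apple a b = "V" := by
  unfold pvVCoords
  simp only [List.mem_flatMap, List.mem_filterMap, List.mem_zipIdx_iff_getElem?]
  constructor
  · rintro ⟨ri, hri, cj, hcj, hx⟩
    split at hx
    case isTrue hv =>
      obtain ⟨rfl, rfl⟩ : ri.2 = a ∧ cj.2 = b := by
        injection hx with h; exact ⟨congrArg Prod.fst h, congrArg Prod.snd h⟩
      obtain ⟨hlt, hget⟩ := List.getElem?_eq_some_iff.mp hri
      obtain ⟨hlt2, hget2⟩ := List.getElem?_eq_some_iff.mp hcj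
      refine ⟨hlt, ?_, ?_⟩
      · rw [getD_eq_getElem_row _ _ hlt, hget]; exact hlt2
      · unfold pvVal
        rw [getD_eq_getElem_row _ _ hlt, hget, List.getD_eq_getElem?_getD,
          List.getElem?_eq_getElem hlt2, hget2]
        exact hv
    case isFalse => exact absurd hx (by simp)
  · rintro ⟨ha, hb, hv⟩
    rw [getD_eq_getElem_row _ _ ha] at hb
    have hv' : apple[a][b] = "V" := by
      unfold pvVal at hv
      rw [getD_eq_getElem_row _ _ ha, List.getD_eq_getElem?_getD,
        List.getElem?_eq_getElem hb] at hv
      exact hv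
    exact ⟨(apple[a], a), by simp [List.getElem?_eq_getElem ha],
      ⟨(apple[a][b], b), by simp [List.getElem?_eq_getElem hb], by rw [if_pos hv']⟩⟩

-- B's per-cell shape
lemma infect_apple_alt_getElem? (apple : List (List String)) (n : Int) (p : Nat) :
    (infect_apple_alt apple n)[p]? =
      apple[p]?.map (fun row =>
        row.mapIdx (fun j c => if pvInfected (pvVCoords apple) n p j then "V" else c)) := by
  simp [infect_apple_alt, List.getElem?_mapIdx]

-- B is the identity whenever any infected cell was already "V" in apple
lemma infect_apple_alt_id (apple : List (List String)) (n : Int)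
    (h : ∀ p q, p < apple.length → q < (apple.getD p []).length →
        pvInfected (pvVCoords apple) n p q = true → pvVal apple p q = "V") :
    infect_apple_alt apple n = apple := by
  apply List.ext_getElem?
  intro p
  rw [infect_apple_alt_getElem?]
  cases hp : apple[p]? with
  | none => rfl
  | some row =>
    simp only [Option.map_some, Option.some.injEq]
    apply List.ext_getElem?
    intro q
    rw [List.getElem?_mapIdx]
    cases hq : row[q]? with
    | none => rfl
    | some c =>
      simp only [Option.map_some, Option.some.injEq]
      split
      case isFalse => rfl
      case isTrue hinf =>
        obtain ⟨hpl, hrow⟩ := List.getElem?_eq_some_iff.mp hp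
        obtain ⟨hql, hc⟩ := List.getElem?_eq_some_iff.mp hq
        have hb : q < (apple.getD p []).length := by
          rw [getD_eq_getElem_row _ _ hpl, hrow]; exact hql
        have := h p q hpl hb hinf
        unfold pvVal at this
        rw [getD_eq_getElem_row _ _ hpl, hrow, List.getD_eq_getElem?_getD,
          List.getElem?_eq_getElem hql, hc] at this
        simp only [Option.getD_some] at this
        rw [this]

lemma infect_apple_nonpos (apple : List (List String)) (n : Int) (h : n ≤ 0) :
    infect_apple apple n = apple := by
  simp [infect_apple, Int.toNat_of_nonpos h]

-- a round changes nothing when the grid has no "V"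
lemma pvFoldl_self {α β : Type} (L : List α) (f : β → α → β) (a : β)
    (h : ∀ x ∈ L, f a x = a) : L.foldl f a = a := by
  induction L with
  | nil => rfl
  | cons x L ih =>
    rw [List.foldl_cons, h x (List.mem_cons_self ..)]
    exact ih (fun y hy => h y (List.mem_cons_of_mem _ hy))

lemma pvStep_noV (g : List (List String)) (h : ∀ row ∈ g, "V" ∉ row) : pvStep g = g := by
  unfold pvStep
  apply pvFoldl_self
  intro i hi
  apply pvFoldl_self
  intro j hj
  have hil : i < g.length := List.mem_range.mp hi
  have hjl : j < (g.getD i []).length := List.mem_range.mp hj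
  unfold pvBody
  rw [if_neg]
  intro hv
  refine h (g.getD i []) ?_ ?_
  · rw [getD_eq_getElem_row _ _ hil]; exact List.getElem_mem hil
  · unfold pvVal at hv
    rw [List.getD_eq_getElem?_getD, List.getElem?_eq_getElem hjl] at hv
    rw [← hv]
    exact List.getElem_mem hjl

lemma pvIter_noV (g : List (List String)) (h : ∀ row ∈ g, "V" ∉ row) :
    ∀ k, pvIter k g = g := by
  intro k
  induction k with
  | zero => rfl
  | succ k ih => rw [pvIter_succ, ih, pvStep_noV g h]

lemma infect_apple_eq_pvIter (apple : List (List String)) (n : Int) :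
    infect_apple apple n = pvIter n.toNat apple := rfl

lemma pvVal_eq_getElem (g : List (List String)) (p q : Nat) (hp : p < g.length)
    (hq : q < g[p].length) : pvVal g p q = g[p][q] := by
  unfold pvVal
  rw [getD_eq_getElem_row _ _ hp, List.getD_eq_getElem?_getD, List.getElem?_eq_getElem hq]; rfl

lemma infect_eq_alt_nonpos (apple : List (List String)) (n : Int) (h : n ≤ 0) :
    infect_apple apple n = infect_apple_alt apple n := by
  rw [infect_apple_nonpos apple n h]
  symm
  apply infect_apple_alt_id
  intro p q hp hq hinf
  unfold pvInfected at hinf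
  simp only [List.any_eq_true, decide_eq_true_eq] at hinf
  obtain ⟨ab, hab, hle⟩ := hinf
  obtain ⟨ha, hb, hv⟩ := (mem_pvVCoords apple ab.1 ab.2).mp (by simpa using hab)
  obtain ⟨h1, h2⟩ : ab.1 = p ∧ ab.2 = q := by omega
  rw [← h1, ← h2]
  exact hv

lemma infect_eq_alt_noV (apple : List (List String)) (n : Int)
    (h : ∀ row ∈ apple, "V" ∉ row) :
    infect_apple apple n = infect_apple_alt apple n := by
  rw [infect_apple_eq_pvIter, pvIter_noV apple h]
  symm
  apply infect_apple_alt_id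
  intro p q hp hq hinf
  exfalso
  unfold pvInfected at hinf
  simp only [List.any_eq_true, decide_eq_true_eq] at hinf
  obtain ⟨ab, hab, _⟩ := hinf
  obtain ⟨ha, hb, hv⟩ := (mem_pvVCoords apple ab.1 ab.2).mp (by simpa using hab)
  rw [getD_eq_getElem_row _ _ ha] at hb
  rw [pvVal_eq_getElem apple ab.1 ab.2 ha hb] at hv
  exact h apple[ab.1] (List.getElem_mem ha) (hv ▸ List.getElem_mem hb)

lemma infect_eq_alt_rect (apple : List (List String)) (n : Int)
    (hr : pvRect ((apple.headD []).length) apple) (hn : 0 < n) :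
    infect_apple apple n = infect_apple_alt apple n := by
  have hbridge : ∀ p q, pvInfB apple ((apple.headD []).length) n.toNat p q ↔
      pvInfected (pvVCoords apple) n p q = true := by
    intro p q
    unfold pvInfected
    simp only [List.any_eq_true, decide_eq_true_eq]
    constructor
    · rintro ⟨a, ha, b, hb, hv, hd⟩
      refine ⟨(a, b), (mem_pvVCoords apple a b).mpr ⟨ha, ?_, hv⟩, ?_⟩
      · rw [pvRect_rowlen _ apple hr a ha]; exact hb
      · unfold pvDist at hd; simp only; omega
    · rintro ⟨ab, hab, hle⟩
      obtain ⟨ha, hb, hv⟩ := (mem_pvVCoords apple ab.1 ab.2).mp (by simpa using hab)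
      refine ⟨ab.1, ha, ab.2, ?_, hv, ?_⟩
      · rw [← pvRect_rowlen _ apple hr ab.1 ha]; exact hb
      · unfold pvDist; omega
  rw [infect_apple_eq_pvIter]
  have hshape := pvIter_shape apple ((apple.headD []).length) n.toNat hr
  apply List.ext_getElem?
  intro p
  rw [infect_apple_alt_getElem?]
  by_cases hp : p < apple.length
  · have hgp : p < (pvIter n.toNat apple).length := by rw [hshape.2]; exact hp
    rw [List.getElem?_eq_getElem hgp, List.getElem?_eq_getElem hp]
    simp only [Option.map_some, Option.some.injEq]
    apply List.ext_getElem?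
    intro q
    rw [List.getElem?_mapIdx]
    have hrowg : (pvIter n.toNat apple)[p].length = (apple.headD []).length :=
      hshape.1 _ (List.getElem_mem hgp)
    have hrowa : apple[p].length = (apple.headD []).length :=
      hr _ (List.getElem_mem hp)
    by_cases hq : q < (apple.headD []).length
    · have hqg : q < (pvIter n.toNat apple)[p].length := by omega
      have hqa : q < apple[p].length := by omega
      rw [List.getElem?_eq_getElem hqg, List.getElem?_eq_getElem hqa]
      simp only [Option.map_some, Option.some.injEq]
      rw [← pvVal_eq_getElem _ p q hgp hqg, ← pvVal_eq_getElem _ p q hp hqa]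
      have hiv := pvIter_val apple _ hr n.toNat p q hp hq
      by_cases hB : pvInfB apple ((apple.headD []).length) n.toNat p q
      · rw [hiv.1 hB, if_pos ((hbridge p q).mp hB)]
      · rw [hiv.2 hB,
          if_neg (fun hc => hB ((hbridge p q).mpr hc))]
    · rw [List.getElem?_eq_none (by omega), List.getElem?_eq_none (by omega)]
      rfl
  · rw [List.getElem?_eq_none (by omega), List.getElem?_eq_none (show apple.length ≤ p by omega)]
    rfl

-- ===== VERDICT (by name: the statement is the Claim_ definition above) =====
theorem infect_apple_spec : Claim_equal_infect_apple := by
  intro apple n _ hpre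
  unfold Spec_infect_apple
  rcases hpre with hrect | hnoV | hnp
  · by_cases hn : n ≤ 0
    · exact infect_eq_alt_nonpos apple n hn
    · exact infect_eq_alt_rect apple n hrect (by omega)
  · exact infect_eq_alt_noV apple n hnoV
  · exact infect_eq_alt_nonpos apple n hnp
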